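-- pv_equiv track=rewrite | github.com/Tapas071/cp | cc/Starter 47/q5.py | rec
-- ===== SOURCE A (Python) =====
-- def rec(s):
--     if not s:
--         return True
--     if len(s)==1:
--         return True;
--     if len(s)%2:
--         return rec(s[ : -1])
--     if s[: len(s)//2]==s[len(s)//2:]:
--         return rec(s[:len(s)//2])
--     return False
-- ===== SOURCE B (Python) =====
-- def rec(s):
--     # Iterative index-based version: never slices or copies; tracks the live
--     # prefix length n of the original string and compares halves char by char.
--     n = len(s)
--     while n > 1:
--         if n % 2:
--             n -= 1
--             continue
--         h = n // 2
--         for i in range(h):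
--             if s[i] != s[h + i]:
--                 return False
--         n = h
--     return True
-- ===== Notes on version B (the rewrite author's own statement) =====
-- stated objective: alternative
-- what changed: Replaces A's recursion-with-slicing (each step copies s[:-1] or s[:n//2] and compares whole slices) by an iterative loop over a prefix length n of the untouched original string, comparing the two halves character by character via indices.
import Mathlib
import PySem

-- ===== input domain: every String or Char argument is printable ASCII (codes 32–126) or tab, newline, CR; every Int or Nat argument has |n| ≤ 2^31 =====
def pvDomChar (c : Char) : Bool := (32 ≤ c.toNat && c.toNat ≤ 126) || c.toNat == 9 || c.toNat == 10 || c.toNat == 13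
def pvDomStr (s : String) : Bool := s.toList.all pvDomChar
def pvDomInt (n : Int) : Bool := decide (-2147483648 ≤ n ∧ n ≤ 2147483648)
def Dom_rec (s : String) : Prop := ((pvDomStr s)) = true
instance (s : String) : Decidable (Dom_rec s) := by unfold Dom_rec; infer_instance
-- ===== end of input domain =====

-- B replaces A's recursion-with-slicing by an iterative index loop over a prefix length of the untouched string (alternative decomposition).

-- ===== PORT A =====
-- Literal port of A on the code-point list.  The slices are exact here:
-- s[:-1] = dropLast (PySem.List.slice_to_neg_one) and, since len(s)//2 is a
-- natural number in range, s[:len(s)//2] = take (len/2) and s[len(s)//2:] =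
-- drop (len/2) (PySem.List.slice_to_natCast / slice_from_natCast); len(s) ≥ 0,
-- so Python's // and % agree with Nat division/mod.
def recA (l : List Char) : Bool :=
  if l.isEmpty then true
  else if l.length == 1 then true
  else if l.length % 2 == 1 then recA l.dropLast
  else if l.take (l.length / 2) == l.drop (l.length / 2) then recA (l.take (l.length / 2))
  else false
termination_by l.length
decreasing_by
  · simp [List.isEmpty_iff] at *; cases l with | nil => simp_all | cons a t => simp
  · have : l.length / 2 < l.length := by
      rcases l with _ | ⟨a, t⟩ <;> simp_all; omega
    simpa using Nat.lt_of_le_of_lt (by simp) this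

def rec (s : String) : Bool := recA s.toList

-- ===== PORT B =====
-- for i in range(h): if s[i] != s[h+i]: return False   (indices stay in range, so getD is exact)
def chkB (l : List Char) (h i : Nat) : Bool :=
  if i < h then
    if l.getD i ' ' == l.getD (h + i) ' ' then chkB l h (i + 1) else false
  else true
termination_by h - i

-- while n > 1: …  (n strictly decreases each iteration)
def loopB (l : List Char) (n : Nat) : Bool :=
  if n ≤ 1 then true
  else if n % 2 == 1 then loopB l (n - 1)
  else if chkB l (n / 2) 0 then loopB l (n / 2)
  else false
termination_by n
decreasing_by all_goals omega

def rec_alt (s : String) : Bool := loopB s.toList s.toList.length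

-- ===== PRECONDITION & SPEC =====
def Spec_rec (s : String) (out : Bool) : Prop := out = rec_alt s
instance (s : String) (out : Bool) : Decidable (Spec_rec s out) := by unfold Spec_rec; infer_instance

-- ===== CLAIM (what is proved, stated in full; the proofs are below) =====
def Claim_equal_rec : Prop := ∀ (s : String), Dom_rec s → Spec_rec s (rec s)

-- ===== LEMMAS AND PROOFS =====

-- B's inner character loop succeeds iff every remaining position of the first half matches the second half.
theorem chkB_iff (l : List Char) (h : Nat) :
    ∀ i, chkB l h i = true ↔ ∀ j, i ≤ j → j < h → l.getD j ' ' = l.getD (h + j) ' ' := by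
  intro i
  induction i using chkB.induct l h with
  | case1 i hih heq ih =>
    rw [chkB]
    simp only [hih, if_pos, heq, if_pos]
    constructor
    · intro ht j hij hjh
      rcases Nat.eq_or_lt_of_le hij with rfl | hlt
      · exact beq_iff_eq.mp heq
      · exact (ih.mp ht) j hlt hjh
    · intro hall; exact ih.mpr fun j h1 h2 => hall j (by omega) h2
  | case2 i hih heq =>
    rw [chkB]; simp [hih]
    constructor
    · rintro ⟨h1, -⟩ j _ _; exact absurd h1 (by simpa using heq)
    · intro hall; exact absurd (hall i le_rfl hih) (by simpa using heq)
  | case3 i hih =>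
    rw [chkB]; simp [hih]
    intro j h1 h2; omega

-- A's slice equality of the two halves, restated pointwise (bridges A's comparison with B's loop).
theorem halves_iff (l : List Char) (h : Nat) (hh : h + h ≤ l.length) :
    (l.take h = (l.drop h).take h) ↔ ∀ j, j < h → l.getD j ' ' = l.getD (h + j) ' ' := by
  constructor
  · intro he j hj
    have h1 : (l.take h).getD j ' ' = ((l.drop h).take h).getD j ' ' := by rw [he]
    simp only [List.getD_eq_getElem?_getD, List.getElem?_take, List.getElem?_drop] at h1 ⊢
    simpa [hj] using h1
  · intro hall
    apply List.ext_getElem?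
    intro i
    simp only [List.getElem?_take, List.getElem?_drop]
    by_cases hi : i < h
    · have := hall i hi
      simp only [List.getD_eq_getElem?_getD] at this
      have hl1 : i < l.length := by omega
      have hl2 : h + i < l.length := by omega
      simp [hi, hl1, hl2] at this ⊢
      simpa using this
    · simp [hi]

-- Loop invariant: B's loop at prefix length n computes what A computes on the actual prefix l.take n.
theorem recA_eq_loopB (n : Nat) (l : List Char) (hn : n ≤ l.length) :
    recA (l.take n) = loopB l n := by
  induction n using Nat.strong_induction_on with
  | _ n ih =>
  have hlen : (l.take n).length = n := by simp [hn]
  rw [recA, loopB]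
  by_cases h1 : n ≤ 1
  · interval_cases n
    · simp
    · obtain ⟨a, ha⟩ := List.length_eq_one_iff.mp hlen
      simp [ha]
  · have hne : ¬ (l.take n).isEmpty := by
      intro hcon
      rw [List.isEmpty_iff] at hcon
      rw [hcon] at hlen
      simp at hlen
      omega
    simp only [hlen, hne, if_false]
    have h2 : ¬ (n == 1) = true := by simp; omega
    simp only [h2, if_false, if_neg h1]
    by_cases hodd : n % 2 = 1
    · have hb : (n % 2 == 1) = true := by simp [hodd]
      simp only [hb, if_pos]
      have hd : (l.take n).dropLast = l.take (n - 1) := by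
        rw [List.dropLast_eq_take, hlen, List.take_take]
        congr 1; omega
      rw [hd]
      exact ih (n - 1) (by omega) (by omega)
    · have hb : ¬ (n % 2 == 1) = true := by simp [hodd]
      simp only [hb, if_false]
      have hhalf : n / 2 + n / 2 ≤ l.length := by omega
      have ht : (l.take n).take (n / 2) = l.take (n / 2) := by
        rw [List.take_take]; congr 1; omega
      have hdt : (l.take n).drop (n / 2) = (l.drop (n / 2)).take (n / 2) := by
        rw [List.drop_take]; congr 1; omega
      rw [ht, hdt]
      have hiff : (l.take (n / 2) == (l.drop (n / 2)).take (n / 2)) = chkB l (n / 2) 0 := by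
        rcases hc : chkB l (n / 2) 0 with _ | _
        · simp only [beq_eq_false_iff_ne, ne_eq]
          intro he
          have := (halves_iff l (n / 2) hhalf).mp he
          rw [(chkB_iff l (n / 2) 0).symm.mp] at hc
          · simp at hc
          · exact fun j _ hj => this j hj
        · simp only [beq_iff_eq]
          exact (halves_iff l (n / 2) hhalf).mpr
            (fun j hj => ((chkB_iff l (n / 2) 0).mp hc) j (Nat.zero_le _) hj)
      rw [hiff]
      rcases hc : chkB l (n / 2) 0
      · simp
      · simp only [if_pos]
        exact ih (n / 2) (by omega) (by omega)

-- ===== VERDICT (by name: the statement is the Claim_ definition above) =====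
theorem rec_spec : Claim_equal_rec := by
  intro s _
  unfold Spec_rec rec rec_alt
  have h := recA_eq_loopB s.toList.length s.toList le_rfl
  rwa [List.take_length] at h
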